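-- pv_equiv track=rewrite | github.com/DungLuongTuan/Music-chat | app/apis/seq2seq.py | whitespace
-- ===== SOURCE A (Python) =====
-- def whitespace(text):
-- 	punctuation = ['.', ',', '!', '?']
-- 	sentence = ''
-- 	for i in range(len(text)):
-- 		if (text[i] in punctuation) and (i > 0) and (text[i-1] != ' '):
-- 			sentence += ' '
-- 		sentence += text[i]
-- 	return sentence
-- ===== SOURCE B (Python) =====
-- def whitespace(text):
--     def fix(word):
--         return word[:1] + ''.join(' ' + c if c in '.,!?' else c for c in word[1:])
--     return ' '.join(fix(w) for w in text.split(' '))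
-- ===== Notes on version B (the rewrite author's own statement) =====
-- stated objective: alternative
-- what changed: Replaced the index loop with its predecessor test (text[i-1] != space) by a staged split-transform-join: split the text on the space character, insert a space before every punctuation character except at a word's first position, rejoin with single spaces; the predecessor condition and index arithmetic disappear entirely.
import Mathlib
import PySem

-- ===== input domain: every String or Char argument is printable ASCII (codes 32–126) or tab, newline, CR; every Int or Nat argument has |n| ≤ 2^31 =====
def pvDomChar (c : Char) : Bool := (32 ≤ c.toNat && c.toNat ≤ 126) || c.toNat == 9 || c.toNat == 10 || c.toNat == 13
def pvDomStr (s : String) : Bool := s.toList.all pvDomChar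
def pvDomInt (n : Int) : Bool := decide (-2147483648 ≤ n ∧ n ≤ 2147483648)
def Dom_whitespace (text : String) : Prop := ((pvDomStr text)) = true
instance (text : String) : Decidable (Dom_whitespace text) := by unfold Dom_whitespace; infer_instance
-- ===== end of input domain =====

-- B replaces the index loop and predecessor test by split-on-space / per-word fix / rejoin (objective: alternative).


-- ===== PORT A =====
-- for i in range(len(text)): optional space (if text[i] in punctuation and i>0 and text[i-1]!=' '), then text[i];
-- the accumulator is carried as List Char and packed with String.mk at the end (Lean's String.append is opaque).
def whitespace (text : String) : String :=
  let punctuation : List Char := ['.', ',', '!', '?']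
  let cs := text.toList
  let sentence :=
    (PySem.List.pyRange 0 (cs.length : Int) 1).foldl
      (fun sentence i =>
        let sentence :=
          if (PySem.List.pyGetD cs i ' ') ∈ punctuation ∧ 0 < i ∧ (PySem.List.pyGetD cs (i-1) ' ') ≠ ' '
          then sentence ++ [' '] else sentence
        sentence ++ [PySem.List.pyGetD cs i ' '])
      ([] : List Char)
  String.mk sentence

-- ===== PORT B =====
-- fix(word) = word[:1] + ''.join(' ' + c if c in '.,!?' else c for c in word[1:])
def wsFix (w : List Char) : List Char :=
  PySem.Chars.slice w none (some 1) ++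
    (PySem.Chars.slice w (some 1) none).flatMap
      (fun c => if c ∈ ['.', ',', '!', '?'] then [' ', c] else [c])

-- ' '.join(fix(w) for w in text.split(' '))
def whitespace_alt (text : String) : String :=
  String.mk (PySem.Chars.join [' '] ((PySem.Chars.splitOn text.toList [' ']).map wsFix))

-- ===== PRECONDITION & SPEC =====
def Spec_whitespace (text : String) (out : String) : Prop := out = whitespace_alt text
instance (text : String) (out : String) : Decidable (Spec_whitespace text out) := by unfold Spec_whitespace; infer_instance

-- ===== CLAIM (what is proved, stated in full; the proofs are below) =====
def Claim_equal_whitespace : Prop := ∀ (text : String), Dom_whitespace text → Spec_whitespace text (whitespace text)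

-- ===== LEMMAS AND PROOFS =====

-- one output chunk of A's loop body, as a function of (previous char, current char)
def wsChunk (p c : Char) : List Char :=
  if p ≠ ' ' ∧ c ∈ ['.', ',', '!', '?'] then [' ', c] else [c]

-- A's scan, written as a structural recursion carrying the previous character
def wsGo (prev : Char) : List Char → List Char
  | [] => []
  | c :: cs => wsChunk prev c ++ wsGo c cs

-- A's loop body over list cs
def wsStep (cs : List Char) (sentence : List Char) (i : Int) : List Char :=
  let sentence :=
    if (PySem.List.pyGetD cs i ' ') ∈ ['.', ',', '!', '?'] ∧ 0 < i ∧ (PySem.List.pyGetD cs (i-1) ' ') ≠ ' '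
    then sentence ++ [' '] else sentence
  sentence ++ [PySem.List.pyGetD cs i ' ']

theorem wsGo_append (cs : List Char) (prev d : Char) :
    wsGo prev (cs ++ [d]) = wsGo prev cs ++ wsChunk (cs.getLastD prev) d := by
  induction cs generalizing prev with
  | nil => simp [wsGo]
  | cons c cs ih =>
    simp only [List.cons_append, wsGo, ih c, List.getLastD_cons, List.append_assoc]

theorem wsStep_append (ds : List Char) (d : Char) (acc : List Char) (i : Int)
    (h0 : 0 ≤ i) (h1 : i < (ds.length : Int)) :
    wsStep (ds ++ [d]) acc i = wsStep ds acc i := by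
  have hget : PySem.List.pyGetD (ds ++ [d]) i ' ' = PySem.List.pyGetD ds i ' ' := by
    rw [PySem.List.pyGetD_eq_getElem _ ' ' h0 (by simp; omega),
        PySem.List.pyGetD_eq_getElem _ ' ' h0 h1,
        List.getElem_append_left]
  unfold wsStep
  rcases eq_or_lt_of_le h0 with h | h
  · rw [hget]; simp [← h]
  · have hget' : PySem.List.pyGetD (ds ++ [d]) (i-1) ' ' = PySem.List.pyGetD ds (i-1) ' ' := by
      rw [PySem.List.pyGetD_eq_getElem _ ' ' (by omega) (by simp; omega),
          PySem.List.pyGetD_eq_getElem _ ' ' (by omega) (by omega),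
          List.getElem_append_left]
    rw [hget, hget']

-- A's fold equals the prev-carrying scan
theorem wsFold_eq (cs : List Char) :
    (PySem.List.pyRange 0 (cs.length : Int) 1).foldl (wsStep cs) [] = wsGo ' ' cs := by
  induction cs using List.reverseRecOn with
  | nil => simp [PySem.List.pyRange_one_eq_nil, wsGo]
  | append_singleton ds d ih =>
    have hnn : (0:Int) ≤ (ds.length : Int) := Int.natCast_nonneg _
    have hlen : ((ds ++ [d]).length : Int) = (ds.length : Int) + 1 := by simp
    rw [hlen, PySem.List.pyRange_one_succ_right hnn, List.foldl_append]
    have hcongr : (PySem.List.pyRange 0 (ds.length : Int) 1).foldl (wsStep (ds ++ [d])) [] =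
        (PySem.List.pyRange 0 (ds.length : Int) 1).foldl (wsStep ds) [] := by
      apply PySem.List.foldl_congr_mem
      intro acc x hx
      have hb := (PySem.List.mem_pyRange_one).1 hx
      exact wsStep_append ds d acc x hb.1 hb.2
    rw [hcongr, ih, wsGo_append, List.foldl_cons, List.foldl_nil]
    have hgetd : PySem.List.pyGetD (ds ++ [d]) ((ds.length : Int)) ' ' = d := by
      rw [PySem.List.pyGetD_eq_getElem _ ' ' hnn (by simp)]
      simp
    unfold wsStep wsChunk
    rcases List.eq_nil_or_concat ds with rfl | ⟨es, e, rfl⟩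
    · simp
    · simp only [List.concat_eq_append] at *
      have hprev : PySem.List.pyGetD ((es ++ [e]) ++ [d]) (((es ++ [e]).length : Int) - 1) ' ' = e := by
        rw [PySem.List.pyGetD_eq_getElem _ ' ' (by simp) (by simp)]
        simp [List.getElem_append_right]
      rw [hgetd, hprev]
      by_cases he : e = ' ' <;> by_cases hd : d ∈ ['.', ',', '!', '?'] <;>
        simp [he, hd]

-- split on a single space, by structural recursion (always a nonempty list of words)
def splitSp : List Char → List (List Char)
  | [] => [[]]
  | c :: rest =>
    match splitSp rest with
    | [] => [[]]   -- unreachable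
    | w :: ws => if c = ' ' then [] :: w :: ws else (c :: w) :: ws

theorem splitSp_ne_nil (cs : List Char) : splitSp cs ≠ [] := by
  induction cs with
  | nil => simp [splitSp]
  | cons c rest ih =>
    unfold splitSp
    rcases h : splitSp rest with _ | ⟨w, ws⟩
    · simp
    · by_cases hc : c = ' ' <;> simp [hc]

-- PySem.Chars.splitOn.go with single-char sep, enough fuel
theorem splitOn_go_sp (cs : List Char) (fuel : Nat) (hf : cs.length < fuel)
    (cur : List Char) (acc : List (List Char)) :
    PySem.Chars.splitOn.go [' '] fuel cs cur acc =
      acc.reverse ++ (splitSp cs).modifyHead (cur.reverse ++ ·) := by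
  induction cs generalizing fuel cur acc with
  | nil =>
    cases fuel with
    | zero => omega
    | succ n => simp [PySem.Chars.splitOn.go, splitSp]
  | cons c rest ih =>
    cases fuel with
    | zero => omega
    | succ n =>
      have hn : rest.length < n := by simpa using hf
      by_cases hc : c = ' '
      · subst hc
        rw [PySem.Chars.splitOn.go]
        rw [if_pos (by simp [List.isPrefixOf])]
        have hdrop : List.drop [' '].length (' ' :: rest) = rest := by simp
        rw [hdrop, ih n hn [] (cur.reverse :: acc)]
        rcases h : splitSp rest with _ | ⟨w, ws⟩
        · exact absurd h (splitSp_ne_nil rest)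
        · simp [splitSp, h]
      · rw [PySem.Chars.splitOn.go]
        rw [if_neg (by simp [List.isPrefixOf]; intro h; exact hc h.symm)]
        rw [ih n hn (c :: cur) acc]
        rcases h : splitSp rest with _ | ⟨w, ws⟩
        · exact absurd h (splitSp_ne_nil rest)
        · simp [splitSp, h, hc]

theorem splitOn_sp (cs : List Char) :
    PySem.Chars.splitOn cs [' '] = splitSp cs := by
  rw [PySem.Chars.splitOn, splitOn_go_sp cs (cs.length + 1) (by omega) [] []]
  rcases h : splitSp cs with _ | ⟨w, ws⟩
  · exact absurd h (splitSp_ne_nil cs)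
  · simp

-- insert a space before every punctuation character (the word-internal pass of B)
def wsFixT (w : List Char) : List Char :=
  w.flatMap (fun c => if c ∈ ['.', ',', '!', '?'] then [' ', c] else [c])

theorem wsFix_eq (w : List Char) : wsFix w = w.take 1 ++ wsFixT (w.drop 1) := by
  unfold wsFix wsFixT
  rw [PySem.Chars.slice_eq_listSlice, PySem.Chars.slice_eq_listSlice,
      PySem.List.slice_to _ (by norm_num), PySem.List.slice_from _ (by norm_num)]
  norm_num

-- intercalate over a non-singleton list, head step
theorem intercalate_cons₂ (sep : List Char) (x y : List Char) (l : List (List Char)) :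
    List.intercalate sep (x :: y :: l) = x ++ sep ++ List.intercalate sep (y :: l) := by
  simp [List.intercalate, List.intersperse]

-- intercalate with a head that carries a prepended chunk
theorem intercalate_head_append (sep a x : List Char) (l : List (List Char)) :
    List.intercalate sep ((a ++ x) :: l) = a ++ List.intercalate sep (x :: l) := by
  cases l with
  | nil => simp [List.intercalate]
  | cons y ys => rw [intercalate_cons₂, intercalate_cons₂]; simp

-- the central bridge: A's prev-carrying scan = B's split / per-word fix / join
theorem wsGo_eq_join (cs : List Char) (prev : Char) (w : List Char) (ws : List (List Char))
    (h : splitSp cs = w :: ws) :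
    wsGo prev cs =
      List.intercalate [' ']
        ((if prev = ' ' then w.take 1 ++ wsFixT (w.drop 1) else wsFixT w)
          :: ws.map (fun v => v.take 1 ++ wsFixT (v.drop 1))) := by
  induction cs generalizing prev w ws with
  | nil =>
    simp only [splitSp] at h
    cases h
    simp [wsGo, wsFixT, List.intercalate]
  | cons c rest ih =>
    rcases h0 : splitSp rest with _ | ⟨w0, ws0⟩
    · exact absurd h0 (splitSp_ne_nil rest)
    by_cases hc : c = ' '
    · subst hc
      simp only [splitSp, h0, if_pos rfl] at h
      cases h
      have ihr := ih ' ' w0 ws0 h0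
      rw [if_pos rfl] at ihr
      simp only [wsGo, ihr, List.map_cons]
      rw [intercalate_cons₂]
      have hch : wsChunk prev ' ' = [' '] := by simp [wsChunk]
      rw [hch]
      split_ifs <;> simp [wsFixT]
    · simp only [splitSp, h0, if_neg hc] at h
      cases h
      have ihr := ih c w0 ws h0
      rw [if_neg hc] at ihr
      simp only [wsGo, ihr]
      by_cases hp : prev = ' '
      · subst hp
        rw [if_pos rfl]
        have hch : wsChunk ' ' c = [c] := by simp [wsChunk]
        rw [hch]
        simpa using (intercalate_head_append [' '] [c] (wsFixT w0)
          (ws.map (fun v => v.take 1 ++ wsFixT (v.drop 1)))).symm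
      · rw [if_neg hp]
        have hT : wsFixT (c :: w0) = wsChunk prev c ++ wsFixT w0 := by
          unfold wsFixT wsChunk
          rw [List.flatMap_cons]
          congr 1
          by_cases hd : c ∈ ['.', ',', '!', '?'] <;> simp [hd, hp]
        rw [hT]
        exact (intercalate_head_append [' '] (wsChunk prev c) (wsFixT w0)
          (ws.map (fun v => v.take 1 ++ wsFixT (v.drop 1)))).symm

-- ===== VERDICT (by name: the statement is the Claim_ definition above) =====
theorem whitespace_spec : Claim_equal_whitespace := by
  intro text _
  show whitespace text = whitespace_alt text
  rcases h : splitSp text.toList with _ | ⟨w, ws⟩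
  · exact absurd h (splitSp_ne_nil text.toList)
  show String.mk ((PySem.List.pyRange 0 ((text.toList.length : Nat) : Int) 1).foldl (wsStep text.toList) []) =
       String.mk (PySem.Chars.join [' '] ((PySem.Chars.splitOn text.toList [' ']).map wsFix))
  rw [wsFold_eq, splitOn_sp, h]
  have hmain := wsGo_eq_join text.toList ' ' w ws h
  rw [if_pos rfl] at hmain
  have hfun : (fun v : List Char => v.take 1 ++ wsFixT (v.drop 1)) = wsFix := by
    funext v; exact (wsFix_eq v).symm
  rw [hmain, hfun, ← wsFix_eq w]
  show String.mk (List.intercalate [' '] (wsFix w :: ws.map wsFix)) =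
       String.mk (PySem.Chars.join [' '] ((w :: ws).map wsFix))
  rfl
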